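-- pv_equiv track=rewrite | github.com/andrewmarconi/portraits | portraits/generators/voice_original.py | extract_snac_codes
-- ===== SOURCE A (Python) =====
-- CODE_END_TOKEN_ID = 128258
--
-- SNAC_MIN_ID = 128266
--
-- SNAC_MAX_ID = 156937
--
-- def extract_snac_codes(token_ids: list[int]) -> list[int]:
--     """
--     Extract SNAC audio codes from generated tokens.
--
--     Args:
--         token_ids: List of generated token IDs
--
--     Returns:
--         List of SNAC audio codes
--     """
--     try:
--         eos_idx = token_ids.index(CODE_END_TOKEN_ID)
--     except ValueError:
--         eos_idx = len(token_ids)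
--
--     snac_codes = [
--         token_id for token_id in token_ids[:eos_idx] if SNAC_MIN_ID <= token_id <= SNAC_MAX_ID
--     ]
--
--     return snac_codes
-- ===== SOURCE B (Python) =====
-- def extract_snac_codes(token_ids: list[int]) -> list[int]:
--     """Single pass: stop at the end token, keep in-range SNAC ids."""
--     snac_codes = []
--     for token_id in token_ids:
--         if token_id == 128258:  # CODE_END_TOKEN_ID
--             break
--         if 128266 <= token_id <= 156937:  # SNAC_MIN_ID..SNAC_MAX_ID
--             snac_codes.append(token_id)
--     return snac_codes
-- ===== Notes on version B (the rewrite author's own statement) =====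
-- stated objective: simpler
-- what changed: Replaces the two-pass find-index + prefix-slice + comprehension (with ValueError handling) by one loop that breaks at the end token and appends in-range ids as it goes.
import Mathlib
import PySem

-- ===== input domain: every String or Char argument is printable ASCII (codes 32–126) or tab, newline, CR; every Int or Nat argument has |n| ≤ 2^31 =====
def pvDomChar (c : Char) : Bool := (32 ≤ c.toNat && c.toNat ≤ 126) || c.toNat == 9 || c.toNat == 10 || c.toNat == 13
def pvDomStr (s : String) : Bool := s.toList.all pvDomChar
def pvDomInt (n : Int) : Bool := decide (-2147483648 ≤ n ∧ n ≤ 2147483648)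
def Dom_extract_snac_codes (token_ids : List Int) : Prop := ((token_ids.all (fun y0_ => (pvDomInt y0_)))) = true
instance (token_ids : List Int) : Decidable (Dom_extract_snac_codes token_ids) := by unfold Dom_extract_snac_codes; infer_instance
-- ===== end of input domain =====

-- B replaces A's two-pass find-index + prefix-slice + filter by a single pass that breaks at the end token (objective: simpler).
-- ===== PORT A =====
def CODE_END_TOKEN_ID : Int := 128258
def SNAC_MIN_ID : Int := 128266
def SNAC_MAX_ID : Int := 156937

-- A: find the index of the end token (length if absent), slice the prefix, filter the range
def extract_snac_codes (token_ids : List Int) : List Int :=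
  let eos_idx : Nat := (PySem.List.index? token_ids CODE_END_TOKEN_ID).getD token_ids.length
  (PySem.List.slice token_ids none (some ((eos_idx : Int)))).filter
    (fun token_id => decide (SNAC_MIN_ID ≤ token_id ∧ token_id ≤ SNAC_MAX_ID))

-- ===== PORT B =====
-- B: one pass, break at the end token, keep in-range ids
def extract_snac_codes_alt : List Int → List Int
  | [] => []
  | token_id :: rest =>
    if token_id = CODE_END_TOKEN_ID then []
    else if SNAC_MIN_ID ≤ token_id ∧ token_id ≤ SNAC_MAX_ID then
      token_id :: extract_snac_codes_alt rest
    else extract_snac_codes_alt rest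

-- ===== PRECONDITION & SPEC =====
def Spec_extract_snac_codes (token_ids : List Int) (out : List Int) : Prop := out = extract_snac_codes_alt token_ids
instance (token_ids : List Int) (out : List Int) : Decidable (Spec_extract_snac_codes token_ids out) := by unfold Spec_extract_snac_codes; infer_instance

-- ===== CLAIM (what is proved, stated in full; the proofs are below) =====
def Claim_equal_extract_snac_codes : Prop := ∀ (token_ids : List Int), Dom_extract_snac_codes token_ids → Spec_extract_snac_codes token_ids (extract_snac_codes token_ids)

-- ===== LEMMAS AND PROOFS =====

-- ===== VERDICT (by name: the statement is the Claim_ definition above) =====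
lemma take_idx_filter (xs : List Int) :
    (xs.take ((PySem.List.index? xs CODE_END_TOKEN_ID).getD xs.length)).filter
      (fun t => decide (SNAC_MIN_ID ≤ t ∧ t ≤ SNAC_MAX_ID)) = extract_snac_codes_alt xs := by
  induction xs with
  | nil => simp [extract_snac_codes_alt]
  | cons x xs ih =>
    by_cases hx : x = CODE_END_TOKEN_ID
    · subst hx
      rw [PySem.List.index?_cons_self]
      simp [extract_snac_codes_alt]
    · rw [PySem.List.index?_cons_of_ne xs hx]
      have hstep : ((PySem.List.index? xs CODE_END_TOKEN_ID).map (· + 1)).getD (xs.length + 1)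
          = (PySem.List.index? xs CODE_END_TOKEN_ID).getD xs.length + 1 := by
        cases PySem.List.index? xs CODE_END_TOKEN_ID <;> rfl
      simp only [List.length_cons, hstep, List.take_succ_cons, List.filter_cons]
      by_cases hr : SNAC_MIN_ID ≤ x ∧ x ≤ SNAC_MAX_ID
      · rw [if_pos (decide_eq_true hr), ih]
        simp [extract_snac_codes_alt, hx, hr]
      · rw [if_neg (by simp [hr]), ih]
        simp [extract_snac_codes_alt, hx, hr]

theorem extract_snac_codes_spec : Claim_equal_extract_snac_codes := by
  intro token_ids _
  show _ = _
  unfold extract_snac_codes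
  simp only []
  rw [PySem.List.slice_to_natCast]
  exact take_idx_filter token_ids
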